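-- pv_equiv track=rewrite | github.com/Wewoll/TIC | utils.py | decodificarDeBytes
-- ===== SOURCE A (Python) =====
-- def decodificarMensaje(alfabeto_fuente, codigos, cadena_codificada):
--     mapa_decodificacion = dict(zip(codigos, alfabeto_fuente))
--
--     mensaje_decodificado = []
--     buffer_actual = ""
--
--     for caracter in cadena_codificada:
--         buffer_actual += caracter
--
--         if buffer_actual in mapa_decodificacion:
--             simbolo = mapa_decodificacion[buffer_actual]
--             mensaje_decodificado.append(simbolo)
--             buffer_actual = ""
--
--     if buffer_actual:
--         return f"ERROR: No se pudo decodificar. Sobrante en el buffer: '{buffer_actual}'"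
--
--     # return " ".join(mensaje_decodificado) si quiero todo separado
--     return "".join(mensaje_decodificado)
--
-- def decodificarDeBytes(alfabeto_fuente, codigos, secuencia_bytes):
--     # Leer la "nota": el primer byte nos dice cuántos bits de relleno hay.
--     padding = secuencia_bytes[0]
--
--     bits_string = ""
--     for valor_byte in secuencia_bytes[1:]:
--         # Convertimos el número (ej: 179) a su representación binaria (ej: '0b10110011')
--         # y le quitamos el prefijo '0b'.
--         bits_del_byte = bin(valor_byte)[2:]
--         # Nos aseguramos de que cada trozo tenga 8 bits, rellenando con ceros a la izquierda.
--         bits_del_byte = bits_del_byte.zfill(8)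
--         bits_string += bits_del_byte
--
--     # Quitar los bits de relleno que se agregaron al codificar.
--     if padding > 0:
--         bits_string = bits_string[:-padding]
--
--     return decodificarMensaje(alfabeto_fuente, codigos, bits_string)
-- ===== SOURCE B (Python) =====
-- def decodificarDeBytes(alfabeto_fuente, codigos, secuencia_bytes):
--     padding = secuencia_bytes[0]
--     bits = ''.join(bin(v)[2:].zfill(8) for v in secuencia_bytes[1:])
--     if padding > 0:
--         bits = bits[:-padding]
--
--     mapa = dict(zip(codigos, alfabeto_fuente))
--     # distinct code lengths, ascending; the empty code can never consume a bit
--     lengths = sorted({len(k) for k in mapa if k})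
--
--     out = []
--     rest = bits
--     while rest:
--         for l in lengths:
--             simbolo = mapa.get(rest[:l])
--             if simbolo is not None:
--                 out.append(simbolo)
--                 rest = rest[l:]
--                 break
--         else:
--             return f"ERROR: No se pudo decodificar. Sobrante en el buffer: '{rest}'"
--     return ''.join(out)
-- ===== Notes on version B (the rewrite author's own statement) =====
-- stated objective: faster
-- what changed: Replaces A's char-by-char scan with a growing buffer rebuilt and hashed at every bit by a shortest-prefix tokenizer: B precomputes the sorted set of distinct code lengths and repeatedly strips the shortest matching fixed-length code prefix off the remaining bit string.
import Mathlib
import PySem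

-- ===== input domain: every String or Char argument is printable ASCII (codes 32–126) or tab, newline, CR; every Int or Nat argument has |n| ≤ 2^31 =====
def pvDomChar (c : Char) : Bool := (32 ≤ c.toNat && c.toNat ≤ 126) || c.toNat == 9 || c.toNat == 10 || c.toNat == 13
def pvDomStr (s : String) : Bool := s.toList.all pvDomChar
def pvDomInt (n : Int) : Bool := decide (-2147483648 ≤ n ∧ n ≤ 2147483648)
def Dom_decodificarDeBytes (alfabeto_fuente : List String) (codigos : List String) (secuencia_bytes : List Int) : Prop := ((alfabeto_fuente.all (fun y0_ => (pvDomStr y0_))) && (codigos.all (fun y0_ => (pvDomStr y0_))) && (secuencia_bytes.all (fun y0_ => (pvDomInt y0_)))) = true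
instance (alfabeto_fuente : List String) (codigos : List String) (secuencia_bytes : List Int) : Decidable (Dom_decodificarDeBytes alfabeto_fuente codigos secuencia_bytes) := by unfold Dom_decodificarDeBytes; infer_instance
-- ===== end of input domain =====

-- B re-implements the prefix decoder as shortest-prefix tokenization over the set of code
-- lengths instead of A's char-by-char growing-buffer scan; byte-to-bits step kept as in A.

-- shared literal of the f-string both Pythons produce
def pvError (buf : List Char) : String :=
  String.ofList ("ERROR: No se pudo decodificar. Sobrante en el buffer: '".toList ++ buf ++ ['\''])

-- ===== PORT A =====
-- one iteration of A's "for caracter in cadena" loop: grow the buffer, emit on a dict hit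
def pvStepA (mapa : PySem.Dict String String) (st : List String × List Char) (c : Char) :
    List String × List Char :=
  let buf := st.2 ++ [c]
  match mapa.get? (String.ofList buf) with
  | some simbolo => (st.1 ++ [simbolo], [])
  | none => (st.1, buf)

def decodificarMensaje (alfabeto_fuente : List String) (codigos : List String)
    (cadena : List Char) : String :=
  let mapa := PySem.Dict.ofList (codigos.zip alfabeto_fuente)
  let st := cadena.foldl (pvStepA mapa) ([], [])
  if st.2 ≠ [] then pvError st.2
  else PySem.Str.join "" st.1

def decodificarDeBytes (alfabeto_fuente : List String) (codigos : List String) (secuencia_bytes : List Int) : String :=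
  match PySem.List.pyGet? secuencia_bytes 0 with
  | none => ""   -- IndexError on the empty list: excluded by Pre_
  | some padding =>
    let bits0 := (PySem.List.slice secuencia_bytes (some 1) none).foldl
      (fun b v => b ++ PySem.Chars.zfill (PySem.List.slice (PySem.Int.toBinChars0b v) (some 2) none) 8) []
    let bits := if padding > 0 then PySem.List.slice bits0 none (some (-padding)) else bits0
    decodificarMensaje alfabeto_fuente codigos bits

-- ===== PORT B =====
-- B's while-loop: repeatedly strip the shortest matching code prefix (lengths tried ascending);
-- fuel = number of remaining bits, enough since every tried length is ≥ 1
def pvDecodeB (mapa : PySem.Dict String String) (lengths : List Int) :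
    Nat → List Char → List String → String
  | fuel, rest, out =>
    if rest = [] then PySem.Str.join "" out
    else
      match fuel with
      | 0 => pvError rest   -- fuel exhausted; unreachable for fuel ≥ rest.length
      | fuel' + 1 =>
        match lengths.findSome?
            (fun l => (mapa.get? (String.ofList (PySem.List.slice rest none (some l)))).map
              (fun s => (l, s))) with
        | some (l, s) => pvDecodeB mapa lengths fuel' (PySem.List.slice rest (some l) none) (out ++ [s])
        | none => pvError rest

def decodificarDeBytes_alt (alfabeto_fuente : List String) (codigos : List String) (secuencia_bytes : List Int) : String :=
  match PySem.List.pyGet? secuencia_bytes 0 with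
  | none => ""   -- IndexError on the empty list: excluded by Pre_
  | some padding =>
    let bits0 := ((PySem.List.slice secuencia_bytes (some 1) none).map
      (fun v => PySem.Chars.zfill (PySem.List.slice (PySem.Int.toBinChars0b v) (some 2) none) 8)).flatten
    let bits := if padding > 0 then PySem.List.slice bits0 none (some (-padding)) else bits0
    let mapa := PySem.Dict.ofList (codigos.zip alfabeto_fuente)
    let lengths := PySem.List.sorted
      (PySem.Set.ofList ((mapa.keys.filter (fun k => !(k == ""))).map PySem.Str.len))
      (fun x => x) false
    pvDecodeB mapa lengths bits.length bits []

-- ===== PRECONDITION & SPEC =====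
-- Pre_ excludes only the empty byte list, on which A raises IndexError at secuencia_bytes[0].
def Pre_decodificarDeBytes (alfabeto_fuente : List String) (codigos : List String) (secuencia_bytes : List Int) : Prop :=
  secuencia_bytes ≠ []
instance (alfabeto_fuente : List String) (codigos : List String) (secuencia_bytes : List Int) : Decidable (Pre_decodificarDeBytes alfabeto_fuente codigos secuencia_bytes) := by unfold Pre_decodificarDeBytes; infer_instance

def pvWitness_decodificarDeBytes : List String × List String × List Int :=
  (["x", "y"], ["0", "1"], [0, 5])

def Spec_decodificarDeBytes (alfabeto_fuente : List String) (codigos : List String) (secuencia_bytes : List Int) (out : String) : Prop := out = decodificarDeBytes_alt alfabeto_fuente codigos secuencia_bytes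
instance (alfabeto_fuente : List String) (codigos : List String) (secuencia_bytes : List Int) (out : String) : Decidable (Spec_decodificarDeBytes alfabeto_fuente codigos secuencia_bytes out) := by unfold Spec_decodificarDeBytes; infer_instance

-- ===== CLAIM (what is proved, stated in full; the proofs are below) =====
def Claim_equal_decodificarDeBytes : Prop := ∀ (alfabeto_fuente : List String) (codigos : List String) (secuencia_bytes : List Int), Dom_decodificarDeBytes alfabeto_fuente codigos secuencia_bytes → Pre_decodificarDeBytes alfabeto_fuente codigos secuencia_bytes → Spec_decodificarDeBytes alfabeto_fuente codigos secuencia_bytes (decodificarDeBytes alfabeto_fuente codigos secuencia_bytes)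

-- ===== LEMMAS AND PROOFS =====

-- A's finishing step (the two returns after the loop)
def pvFinishA (st : List String × List Char) : String :=
  if st.2 ≠ [] then pvError st.2 else PySem.Str.join "" st.1

lemma pvBits_eq (g : Int → List Char) :
    ∀ (L : List Int) (acc : List Char),
    L.foldl (fun b v => b ++ g v) acc = acc ++ (L.map g).flatten := by
  intro L
  induction L with
  | nil => simp
  | cons v L ih => intro acc; simp [List.foldl_cons, ih]

lemma pvRunA_nomatch (mapa : PySem.Dict String String) :
    ∀ (rest : List Char) (msg : List String) (buf : List Char),
    (∀ i : Nat, 1 ≤ i → i ≤ rest.length → mapa.get? (String.ofList (buf ++ rest.take i)) = none) →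
    rest.foldl (pvStepA mapa) (msg, buf) = (msg, buf ++ rest) := by
  intro rest
  induction rest with
  | nil => intro msg buf _; simp
  | cons c rs ih =>
    intro msg buf h
    have h1 := h 1 (by omega) (by simp)
    simp only [List.take_succ_cons, List.take_zero] at h1
    simp only [List.foldl_cons, pvStepA, h1]
    rw [ih msg (buf ++ [c]) ?_]
    · simp
    · intro i hi hile
      have := h (i+1) (by omega) (by simp; omega)
      simpa [List.take_succ_cons, List.append_assoc] using this

lemma pvRunA_match (mapa : PySem.Dict String String) :
    ∀ (rest : List Char) (msg : List String) (buf : List Char) (j : Nat) (s : String),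
    1 ≤ j → j ≤ rest.length →
    mapa.get? (String.ofList (buf ++ rest.take j)) = some s →
    (∀ i : Nat, 1 ≤ i → i < j → mapa.get? (String.ofList (buf ++ rest.take i)) = none) →
    rest.foldl (pvStepA mapa) (msg, buf) = (rest.drop j).foldl (pvStepA mapa) (msg ++ [s], []) := by
  intro rest
  induction rest with
  | nil => intro msg buf j s hj hle; simp at hle; omega
  | cons c rs ih =>
    intro msg buf j s hj hle hhit hmin
    match j, hj with
    | 1, _ =>
      simp only [List.take_succ_cons, List.take_zero] at hhit
      simp only [List.foldl_cons, pvStepA, hhit, List.drop_succ_cons, List.drop_zero]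
    | (j'+2), _ =>
      have h1 := hmin 1 (by omega) (by omega)
      simp only [List.take_succ_cons, List.take_zero] at h1
      simp only [List.foldl_cons, pvStepA, h1, List.drop_succ_cons]
      apply ih (msg := msg) (buf := buf ++ [c]) (j := j'+1)
      · omega
      · simp at hle; omega
      · simpa [List.take_succ_cons, List.append_assoc] using hhit
      · intro i hi hlt
        have := hmin (i+1) (by omega) (by omega)
        simpa [List.take_succ_cons, List.append_assoc] using this

lemma pvFindSome_first {β : Type} (f : Int → Option (Int × β)) :
    (∀ a p, f a = some p → p.1 = a) →
    ∀ (L : List Int) (l : Int) (s : β), L.Pairwise (· < ·) → L.findSome? f = some (l, s) →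
    l ∈ L ∧ f l = some (l, s) ∧ ∀ l' ∈ L, l' < l → f l' = none := by
  intro htag L
  induction L with
  | nil => intro l s _ h; simp [List.findSome?] at h
  | cons a L ih =>
    intro l s hp hfind
    rw [List.findSome?_cons] at hfind
    rcases hpa : f a with _ | p
    · rw [hpa] at hfind
      rcases ih l s (List.Pairwise.of_cons hp) hfind with ⟨hmem, hfl, hmin⟩
      refine ⟨List.mem_cons_of_mem _ hmem, hfl, ?_⟩
      intro l' hl' hlt
      rcases List.mem_cons.mp hl' with rfl | h
      · exact hpa
      · exact hmin l' h hlt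
    · rw [hpa] at hfind
      simp only [Option.some.injEq] at hfind
      subst hfind
      have : l = a := by have := htag a (l, s) hpa; simpa using this
      subst this
      refine ⟨List.mem_cons_self, hpa, ?_⟩
      intro l' hl' hlt
      rcases List.mem_cons.mp hl' with rfl | h
      · omega
      · exact absurd hlt (by have := (List.pairwise_cons.mp hp).1 l' h; omega)

lemma pvLengths_pos (mapa : PySem.Dict String String) :
    ∀ l ∈ PySem.List.sorted
      (PySem.Set.ofList ((mapa.keys.filter (fun k => !(k == ""))).map PySem.Str.len))
      (fun x => x) false, 1 ≤ l := by
  intro l hl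
  rw [PySem.List.mem_sorted] at hl
  rw [PySem.Set.mem_ofList] at hl
  rcases List.mem_map.mp hl with ⟨k, hk, rfl⟩
  have hne : k ≠ "" := by simpa using (List.mem_filter.mp hk).2
  rw [PySem.Str.len_eq]
  have : k.toList ≠ [] := fun h => hne (by
    have := congrArg String.ofList h
    simpa using this)
  have : 0 < k.toList.length := List.length_pos_iff.mpr this
  omega

lemma pvLengths_mem (mapa : PySem.Dict String String) (k : String)
    (hc : mapa.contains k = true) (hne : k ≠ "") :
    PySem.Str.len k ∈ PySem.List.sorted
      (PySem.Set.ofList ((mapa.keys.filter (fun k => !(k == ""))).map PySem.Str.len))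
      (fun x => x) false := by
  rw [PySem.List.mem_sorted, PySem.Set.mem_ofList]
  refine List.mem_map.mpr ⟨k, ?_, rfl⟩
  refine List.mem_filter.mpr ⟨(PySem.Dict.contains_iff_mem_keys mapa k).mp hc, by simpa using hne⟩

lemma pvCore (mapa : PySem.Dict String String) (lengths : List Int)
    (h1 : ∀ l ∈ lengths, 1 ≤ l)
    (h2 : lengths.Pairwise (· < ·))
    (h3 : ∀ k : String, mapa.contains k = true → k ≠ "" → PySem.Str.len k ∈ lengths) :
    ∀ (fuel : Nat) (rest : List Char) (msg : List String), rest.length ≤ fuel →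
    pvFinishA (rest.foldl (pvStepA mapa) (msg, [])) = pvDecodeB mapa lengths fuel rest msg := by
  -- helper: a successful lookup of a nonempty prefix puts its length in `lengths`
  have hkey : ∀ (cs : List Char) (s : String), cs ≠ [] →
      mapa.get? (String.ofList cs) = some s → ((cs.length : Int)) ∈ lengths := by
    intro cs s hne hget
    have hc : mapa.contains (String.ofList cs) = true := by
      rw [PySem.Dict.contains_eq_isSome_get?, hget]; rfl
    have hne' : String.ofList cs ≠ "" := by
      intro h
      apply hne
      have := congrArg String.toList h
      simpa using this
    have := h3 _ hc hne'
    rwa [PySem.Str.len_eq, String.toList_ofList] at this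
  intro fuel
  induction fuel with
  | zero =>
    intro rest msg hle
    have : rest = [] := List.eq_nil_of_length_eq_zero (by omega)
    subst this
    simp [pvDecodeB, pvFinishA]
  | succ fuel' ih =>
    intro rest msg hle
    rcases eq_or_ne rest [] with rfl | hne
    · simp [pvDecodeB, pvFinishA]
    have hpos : 0 < rest.length := List.length_pos_iff.mpr hne
    set f : Int → Option (Int × String) :=
      fun l => (mapa.get? (String.ofList (PySem.List.slice rest none (some l)))).map
        (fun s => (l, s)) with hf
    rcases hF : lengths.findSome? f with _ | ⟨l, s⟩
    · -- no length matches : A never matches either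
      have hall : ∀ x ∈ lengths, f x = none := by
        intro x hx
        exact List.findSome?_eq_none_iff.mp hF x hx
      have hnomatch : ∀ i : Nat, 1 ≤ i → i ≤ rest.length →
          mapa.get? (String.ofList (([] : List Char) ++ rest.take i)) = none := by
        intro i hi hile
        by_contra hcon
        rcases Option.ne_none_iff_exists'.mp hcon with ⟨s, hs⟩
        simp only [List.nil_append] at hs
        have hlen : (rest.take i).length = i := by simp; omega
        have hmem : ((i : Int)) ∈ lengths := by
          have := hkey (rest.take i) s (by intro h; rw [h] at hlen; simp at hlen; omega) hs
          rwa [hlen] at this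
        have := hall _ hmem
        rw [hf] at this
        simp only [Option.map_eq_none_iff] at this
        rw [PySem.List.slice_to _ (by omega)] at this
        simp only [Int.toNat_natCast] at this
        rw [hs] at this
        simp at this
      rw [pvRunA_nomatch mapa rest msg [] hnomatch]
      simp only [pvFinishA, pvDecodeB]
      rw [if_neg hne]
      rw [← hf, hF]
      simp [hne]
    · -- first matching length l; A's first match is at prefix length j = min l.toNat rest.length
      have htag : ∀ a p, f a = some p → p.1 = a := by
        intro a p hap
        rw [hf] at hap
        simp only [Option.map_eq_some_iff] at hap
        rcases hap with ⟨s', _, rfl⟩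
        rfl
      rcases pvFindSome_first f htag lengths l s h2 hF with ⟨hlmem, hfl, hmin⟩
      have hl1 : 1 ≤ l := h1 l hlmem
      rw [hf] at hfl
      simp only [Option.map_eq_some_iff] at hfl
      rcases hfl with ⟨s', hget, hpair⟩
      have hs' : s' = s := by simpa [Prod.ext_iff] using hpair
      rw [hs'] at hget
      rw [PySem.List.slice_to _ (by omega)] at hget
      set j : Nat := min l.toNat rest.length with hj
      have htakej : rest.take l.toNat = rest.take j := by
        rcases le_or_gt l.toNat rest.length with h | h
        · simp [hj, Nat.min_eq_left h]
        · rw [List.take_of_length_le (by omega), hj, Nat.min_eq_right (by omega),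
            List.take_length]
      have hj1 : 1 ≤ j := by omega
      have hjle : j ≤ rest.length := by omega
      have hhit : mapa.get? (String.ofList (([] : List Char) ++ rest.take j)) = some s := by
        simpa [htakej] using hget
      have hminA : ∀ i : Nat, 1 ≤ i → i < j →
          mapa.get? (String.ofList (([] : List Char) ++ rest.take i)) = none := by
        intro i hi hij
        by_contra hcon
        rcases Option.ne_none_iff_exists'.mp hcon with ⟨s2, hs2⟩
        simp only [List.nil_append] at hs2
        have hlen : (rest.take i).length = i := by simp; omega
        have hmem : ((i : Int)) ∈ lengths := by
          have := hkey (rest.take i) s2 (by intro h; rw [h] at hlen; simp at hlen; omega) hs2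
          rwa [hlen] at this
        have hlt : (i : Int) < l := by omega
        have := hmin _ hmem hlt
        rw [hf] at this
        simp only [Option.map_eq_none_iff] at this
        rw [PySem.List.slice_to _ (by omega)] at this
        simp only [Int.toNat_natCast] at this
        rw [hs2] at this
        simp at this
      rw [pvRunA_match mapa rest msg [] j s hj1 hjle hhit hminA]
      have hdrop : PySem.List.slice rest (some l) none = rest.drop j := by
        rw [PySem.List.slice_from _ (by omega)]
        rcases le_or_gt l.toNat rest.length with h | h
        · simp [hj, Nat.min_eq_left h]
        · rw [List.drop_of_length_le (by omega), hj, Nat.min_eq_right (by omega),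
            List.drop_length]
      conv_rhs => rw [pvDecodeB]
      rw [if_neg hne, ← hf, hF]
      show _ = pvDecodeB mapa lengths fuel' (PySem.List.slice rest (some l) none) (msg ++ [s])
      rw [hdrop]
      exact ih (rest.drop j) (msg ++ [s]) (by simp; omega)

-- ===== VERDICT (by name: the statement is the Claim_ definition above) =====
theorem decodificarDeBytes_spec : Claim_equal_decodificarDeBytes := by
  intro alfabeto_fuente codigos secuencia_bytes _ hpre
  unfold Spec_decodificarDeBytes decodificarDeBytes decodificarDeBytes_alt decodificarMensaje
  rcases secuencia_bytes with _ | ⟨b, bs⟩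
  · exact absurd rfl hpre
  · rw [PySem.List.pyGet?_zero_cons]
    have hbits : (PySem.List.slice (b :: bs) (some 1) none).foldl
        (fun bl v => bl ++ PySem.Chars.zfill (PySem.List.slice (PySem.Int.toBinChars0b v) (some 2) none) 8) [] =
        ((PySem.List.slice (b :: bs) (some 1) none).map
          (fun v => PySem.Chars.zfill (PySem.List.slice (PySem.Int.toBinChars0b v) (some 2) none) 8)).flatten := by
      rw [pvBits_eq]; simp
    simp only [hbits]
    apply pvCore
    · exact pvLengths_pos _
    · exact PySem.List.sorted_ofList_pairwise_lt _
    · exact fun k hc hne => pvLengths_mem _ k hc hne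
    · exact le_refl _
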